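-- pv_equiv track=rewrite | github.com/oleg5135/lab_6 | lab_6.4_rec.py | find_last_negative
-- ===== SOURCE A (Python) =====
-- def find_last_negative(array, index=None):
--     if index is None:
--         index = len(array) - 1
--     if index < 0:
--         return None
--     if array[index] < 0:
--         return index
--     return find_last_negative(array, index - 1)
-- ===== SOURCE B (Python) =====
-- def find_last_negative(array, index=None):
--     if index is None:
--         index = len(array) - 1
--     if index < 0:
--         return None
--     last = None
--     for i, v in enumerate(array[:index + 1]):
--         if v < 0:
--             last = i
--     return last
-- ===== Notes on version B (the rewrite author's own statement) =====
-- stated objective: idiomatic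
-- what changed: Replaces the downward recursion with a single forward loop over the prefix array[:index+1] that remembers the index of the last negative seen.
-- outside the precondition, e.g. on find_last_negative([1, 2], 5): A raises IndexError, B returns None
import Mathlib
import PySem

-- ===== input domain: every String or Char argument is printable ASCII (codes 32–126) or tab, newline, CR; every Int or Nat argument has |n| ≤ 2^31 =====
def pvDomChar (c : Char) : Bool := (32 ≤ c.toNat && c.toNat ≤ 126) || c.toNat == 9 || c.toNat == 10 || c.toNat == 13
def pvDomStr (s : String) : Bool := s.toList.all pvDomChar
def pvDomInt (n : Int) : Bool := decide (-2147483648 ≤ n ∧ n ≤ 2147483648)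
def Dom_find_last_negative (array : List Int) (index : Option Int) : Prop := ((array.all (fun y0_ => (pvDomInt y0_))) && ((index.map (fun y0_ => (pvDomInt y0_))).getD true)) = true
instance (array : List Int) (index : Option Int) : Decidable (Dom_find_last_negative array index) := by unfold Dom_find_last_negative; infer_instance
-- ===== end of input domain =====

-- B replaces A's downward recursion by one forward loop over the prefix array[:index+1]
-- remembering the last negative's index (idiomatic, O(1) space); return values proved equal on Pre_.

-- ===== PORT A =====
-- the recursive body of A after the `index is None` default has been resolved
def findLastNegA (array : List Int) (i : Int) : Option Int :=
  if i < 0 then none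
  else
    match PySem.List.pyGet? array i with
    | none => none            -- array[i] raises IndexError in Python; excluded by Pre_
    | some v => if v < 0 then some i else findLastNegA array (i - 1)
termination_by (i + 1).toNat
decreasing_by omega

def find_last_negative (array : List Int) (index : Option Int) : Option Int :=
  let i := match index with
    | none => (array.length : Int) - 1
    | some j => j
  findLastNegA array i

-- ===== PORT B =====
def find_last_negative_alt (array : List Int) (index : Option Int) : Option Int :=
  let i := match index with
    | none => (array.length : Int) - 1
    | some j => j
  if i < 0 then none
  else
    (PySem.List.enumerate (PySem.List.slice array none (some (i + 1)))).foldl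
      (fun last p => if p.2 < 0 then some p.1 else last) none

-- ===== PRECONDITION & SPEC =====
-- Pre_ excludes only inputs on which A RAISES IndexError: an explicit index ≥ len(array).
def Pre_find_last_negative (array : List Int) (index : Option Int) : Prop :=
  index.getD ((array.length : Int) - 1) < (array.length : Int)
instance (array : List Int) (index : Option Int) : Decidable (Pre_find_last_negative array index) := by
  unfold Pre_find_last_negative; infer_instance

def pvWitness_find_last_negative : List Int × Option Int := ([3, -1, 2], some 2)

def Spec_find_last_negative (array : List Int) (index : Option Int) (out : Option Int) : Prop := out = find_last_negative_alt array index
instance (array : List Int) (index : Option Int) (out : Option Int) : Decidable (Spec_find_last_negative array index out) := by unfold Spec_find_last_negative; infer_instance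

-- ===== CLAIM (what is proved, stated in full; the proofs are below) =====
def Claim_equal_find_last_negative : Prop := ∀ (array : List Int) (index : Option Int), Dom_find_last_negative array index → Pre_find_last_negative array index → Spec_find_last_negative array index (find_last_negative array index)

-- ===== LEMMAS AND PROOFS =====

def lastNegB (xs : List Int) : Option Int :=
  (PySem.List.enumerate xs).foldl (fun last p => if p.2 < 0 then some p.1 else last) none

theorem lastNegB_step (xs : List Int) (v : Int) :
    lastNegB (xs ++ [v]) = if v < 0 then some (xs.length : Int) else lastNegB xs := by
  unfold lastNegB
  rw [PySem.List.enumerate_append, List.foldl_append]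
  simp [PySem.List.enumerate]

theorem findA_eq_lastNegB_take (array : List Int) (n : Nat) (hn : n ≤ array.length) :
    findLastNegA array ((n : Int) - 1) = lastNegB (array.take n) := by
  induction n with
  | zero => simp [findLastNegA, lastNegB]
  | succ m ih =>
    have hm : m < array.length := by omega
    have htake : array.take (m + 1) = array.take m ++ [array[m]] := by
      rw [List.take_add_one]
      simp [hm]
    rw [htake, lastNegB_step]
    have hget : PySem.List.pyGet? array ((m : Int) + 1 - 1) = some array[m] := by
      simp [hm]
    rw [findLastNegA]
    have : ¬ ((m : Int) + 1 - 1 < 0) := by omega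
    simp only [Nat.cast_add, Nat.cast_one, this, if_false, hget]
    rw [show (m : Int) + 1 - 1 = (m : Int) by omega] at *
    rw [List.length_take, Nat.min_eq_left (le_of_lt hm)]
    split
    · rfl
    · exact ih (le_of_lt hm)

-- ===== VERDICT (by name: the statement is the Claim_ definition above) =====

theorem find_last_negative_spec : Claim_equal_find_last_negative := by
  intro array index _hdom hpre
  unfold Spec_find_last_negative find_last_negative find_last_negative_alt
  cases index with
  | none =>
    simp only
    by_cases h : (array.length : Int) - 1 < 0
    · have : array.length = 0 := by omega
      simp [this, findLastNegA]
    · rw [if_neg h]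
      have hlen : ((array.length : Int) - 1) + 1 = (array.length : Int) := by omega
      rw [hlen, PySem.List.slice_to_natCast, List.take_length]
      have := findA_eq_lastNegB_take array array.length (le_refl _)
      rw [List.take_length] at this
      exact this
  | some j =>
    simp only [Pre_find_last_negative, Option.getD_some] at hpre
    simp only
    by_cases h : j < 0
    · rw [if_pos h]
      rw [findLastNegA]
      simp [h]
    · rw [if_neg h]
      have hj : j = ((j.toNat : Int)) := by omega
      have hle : j.toNat + 1 ≤ array.length := by omega
      have := findA_eq_lastNegB_take array (j.toNat + 1) hle
      rw [hj]
      rw [show ((j.toNat : Int)) + 1 = ((j.toNat + 1 : Nat) : Int) by push_cast; ring,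
        PySem.List.slice_to_natCast]
      rw [show ((j.toNat + 1 : Nat) : Int) - 1 = (j.toNat : Int) by push_cast; ring] at this
      exact this
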